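-- pv_equiv track=rewrite | github.com/sergiorpleon/code-edx-harvard-courses | python/project/project.py | validate_map
-- ===== SOURCE A (Python) =====
-- def validate_map(map):
--     count_x = 0
--     count_plus = 0
--     if len(map) != 12:
--         return False
--     for row in map:
--         if len(row) != 12:
--             return False
--
--         for cell in row:
--             #Validate blocks of those defined
--             values = ["[r]","[R]","[l]","[L]","[u]","[U]","[d]","[D]","[ ]","[*]","[x]","[X]","[+]","[|]","[-]","[F]","[B]"]
--             if not cell in values:
--                 return False
--             else:
--                 #Check if there is more than one start and more than one end
--                 if cell == "[X]"or cell == "[x]":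
--                     count_x = count_x + 1
--                 if cell == "[+]":
--                     count_plus = count_plus + 1
--                 if count_x > 1 or count_plus > 1:
--                     return False
--
--     return True
-- ===== SOURCE B (Python) =====
-- ALLOWED = {"[r]","[R]","[l]","[L]","[u]","[U]","[d]","[D]","[ ]","[*]","[x]","[X]","[+]","[|]","[-]","[F]","[B]"}
--
-- def validate_map(map):
--     if len(map) != 12:
--         return False
--     if not all(len(row) == 12 for row in map):
--         return False
--     if not all(cell in ALLOWED for row in map for cell in row):
--         return False
--     count_x = sum(cell in ("[X]", "[x]") for row in map for cell in row)
--     count_plus = sum(cell == "[+]" for row in map for cell in row)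
--     return count_x <= 1 and count_plus <= 1
-- ===== Notes on version B (the rewrite author's own statement) =====
-- stated objective: simpler
-- what changed: Replaces A's single fused early-exit nested loop with fused counters by separate whole-grid passes: a shape check, one membership pass over a module-level set, and two independent count passes compared against 1 at the end.
import Mathlib
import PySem

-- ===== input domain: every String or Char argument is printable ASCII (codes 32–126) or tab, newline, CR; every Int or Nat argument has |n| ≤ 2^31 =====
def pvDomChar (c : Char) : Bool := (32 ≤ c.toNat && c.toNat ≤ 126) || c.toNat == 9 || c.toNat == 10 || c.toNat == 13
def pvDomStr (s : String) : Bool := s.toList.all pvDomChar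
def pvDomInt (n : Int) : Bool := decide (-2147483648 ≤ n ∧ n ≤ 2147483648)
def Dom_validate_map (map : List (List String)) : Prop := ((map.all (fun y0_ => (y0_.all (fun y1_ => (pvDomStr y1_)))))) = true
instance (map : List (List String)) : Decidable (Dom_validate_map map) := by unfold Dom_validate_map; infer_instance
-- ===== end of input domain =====

-- B: same validation by separate whole-grid passes (shape, membership, two counts) instead of A's fused early-exit loop; same cost.
-- ===== PORT A =====
-- inner 'for cell in row' loop: returns none where A returns False, else the updated (count_x, count_plus)
def pvCellLoop : List String → Nat → Nat → Option (Nat × Nat)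
  | [], cx, cp => some (cx, cp)
  | cell :: rest, cx, cp =>
    let values : List String := ["[r]","[R]","[l]","[L]","[u]","[U]","[d]","[D]","[ ]","[*]","[x]","[X]","[+]","[|]","[-]","[F]","[B]"]
    if cell ∈ values then
      let cx' := if cell == "[X]" || cell == "[x]" then cx + 1 else cx
      let cp' := if cell == "[+]" then cp + 1 else cp
      if cx' > 1 ∨ cp' > 1 then none else pvCellLoop rest cx' cp'
    else none

-- outer 'for row in map' loop carrying the two counters
def pvRowLoop : List (List String) → Nat → Nat → Bool
  | [], _, _ => true
  | row :: rest, cx, cp =>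
    if row.length ≠ 12 then false
    else match pvCellLoop row cx cp with
      | none => false
      | some (cx', cp') => pvRowLoop rest cx' cp'

def validate_map (map : List (List String)) : Bool :=
  if map.length ≠ 12 then false else pvRowLoop map 0 0

-- ===== PORT B =====
def pvALLOWED : PySem.Set String :=
  PySem.Set.ofList ["[r]","[R]","[l]","[L]","[u]","[U]","[d]","[D]","[ ]","[*]","[x]","[X]","[+]","[|]","[-]","[F]","[B]"]

def validate_map_alt (map : List (List String)) : Bool :=
  if map.length ≠ 12 then false
  else if ¬ (map.all fun row => row.length == 12) then false
  else if ¬ (map.all fun row => row.all fun cell => PySem.Set.contains pvALLOWED cell) then false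
  else
    let count_x := (map.flatMap id).countP fun cell => cell == "[X]" || cell == "[x]"
    let count_plus := (map.flatMap id).countP fun cell => cell == "[+]"
    decide (count_x ≤ 1 ∧ count_plus ≤ 1)

-- ===== PRECONDITION & SPEC =====
def Spec_validate_map (map : List (List String)) (out : Bool) : Prop := out = validate_map_alt map
instance (map : List (List String)) (out : Bool) : Decidable (Spec_validate_map map out) := by unfold Spec_validate_map; infer_instance

-- ===== CLAIM (what is proved, stated in full; the proofs are below) =====
def Claim_equal_validate_map : Prop := ∀ (map : List (List String)), Dom_validate_map map → Spec_validate_map map (validate_map map)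

-- ===== LEMMAS AND PROOFS =====

-- characterisation of A's inner loop: starting from counts ≤ 1, it finishes iff every cell is
-- allowed and the final counts stay ≤ 1
theorem pvCellLoop_char (cells : List String) (cx cp : Nat) (hcx : cx ≤ 1) (hcp : cp ≤ 1) :
    pvCellLoop cells cx cp =
      if (cells.all fun c => PySem.Set.contains pvALLOWED c) = true
          ∧ cx + (cells.countP fun c => c == "[X]" || c == "[x]") ≤ 1
          ∧ cp + (cells.countP fun c => c == "[+]") ≤ 1
      then some (cx + (cells.countP fun c => c == "[X]" || c == "[x]"),
                 cp + (cells.countP fun c => c == "[+]"))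
      else none := by
  induction cells generalizing cx cp with
  | nil => simp [pvCellLoop, hcx, hcp]
  | cons c rest ih =>
    have hmem : PySem.Set.contains pvALLOWED c
        = decide (c ∈ ["[r]","[R]","[l]","[L]","[u]","[U]","[d]","[D]","[ ]","[*]","[x]","[X]","[+]","[|]","[-]","[F]","[B]"]) := by
      simp [pvALLOWED, PySem.Set.contains, PySem.Set.mem_ofList]
    simp only [pvCellLoop, List.all_cons, List.countP_cons, hmem]
    by_cases h : c ∈ ["[r]","[R]","[l]","[L]","[u]","[U]","[d]","[D]","[ ]","[*]","[x]","[X]","[+]","[|]","[-]","[F]","[B]"]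
    · simp only [h, decide_true, Bool.true_and, if_true]
      by_cases hx : (c == "[X]" || c == "[x]") = true
      · by_cases hp : (c == "[+]") = true
        · simp only [hx, hp, if_true]
          by_cases hg : cx + 1 > 1 ∨ cp + 1 > 1
          · rw [if_pos hg, if_neg]; rintro ⟨-, h3, h4⟩; omega
          · rw [if_neg hg, ih (cx + 1) (cp + 1) (by omega) (by omega)]
            have ex : cx + 1 + List.countP (fun c => c == "[X]" || c == "[x]") rest
                = cx + (List.countP (fun c => c == "[X]" || c == "[x]") rest + 1) := by omega
            have ep : cp + 1 + List.countP (fun c => c == "[+]") rest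
                = cp + (List.countP (fun c => c == "[+]") rest + 1) := by omega
            rw [ex, ep]
        · simp only [hx, hp, if_true, Bool.false_eq_true, if_false, Nat.add_zero]
          by_cases hg : cx + 1 > 1 ∨ cp > 1
          · rw [if_pos hg, if_neg]; rintro ⟨-, h3, h4⟩; omega
          · rw [if_neg hg, ih (cx + 1) cp (by omega) (by omega)]
            have ex : cx + 1 + List.countP (fun c => c == "[X]" || c == "[x]") rest
                = cx + (List.countP (fun c => c == "[X]" || c == "[x]") rest + 1) := by omega
            rw [ex]
      · by_cases hp : (c == "[+]") = true
        · simp only [hx, hp, if_true, Bool.false_eq_true, if_false, Nat.add_zero]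
          by_cases hg : cx > 1 ∨ cp + 1 > 1
          · rw [if_pos hg, if_neg]; rintro ⟨-, h3, h4⟩; omega
          · rw [if_neg hg, ih cx (cp + 1) (by omega) (by omega)]
            have ep : cp + 1 + List.countP (fun c => c == "[+]") rest
                = cp + (List.countP (fun c => c == "[+]") rest + 1) := by omega
            rw [ep]
        · simp only [hx, hp, Bool.false_eq_true, if_false, Nat.add_zero]
          rw [if_neg (by omega : ¬(cx > 1 ∨ cp > 1)), ih cx cp hcx hcp]
    · simp [h]

-- characterisation of A's outer loop
theorem pvRowLoop_char (rows : List (List String)) (cx cp : Nat) (hcx : cx ≤ 1) (hcp : cp ≤ 1) :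
    pvRowLoop rows cx cp =
      decide ((rows.all fun r => r.length == 12) = true
        ∧ (rows.all fun r => r.all fun c => PySem.Set.contains pvALLOWED c) = true
        ∧ cx + ((rows.flatMap id).countP fun c => c == "[X]" || c == "[x]") ≤ 1
        ∧ cp + ((rows.flatMap id).countP fun c => c == "[+]") ≤ 1) := by
  induction rows generalizing cx cp with
  | nil => simp [pvRowLoop, hcx, hcp]
  | cons row rest ih =>
    simp only [pvRowLoop]
    by_cases hlen : row.length ≠ 12
    · simp [hlen]
    · rw [if_neg hlen, pvCellLoop_char row cx cp hcx hcp]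
      have h12 : row.length = 12 := by omega
      split_ifs with hc
      · obtain ⟨hall, hx1, hp1⟩ := hc
        have hred : (match some (cx + List.countP (fun c => c == "[X]" || c == "[x]") row,
              cp + List.countP (fun c => c == "[+]") row) with
            | none => false
            | some (cx', cp') => pvRowLoop rest cx' cp')
            = pvRowLoop rest (cx + List.countP (fun c => c == "[X]" || c == "[x]") row)
                (cp + List.countP (fun c => c == "[+]") row) := rfl
        rw [hred, ih _ _ (by omega) (by omega)]
        apply decide_eq_decide.mpr
        simp only [List.flatMap_cons, List.countP_append, List.all_cons, Bool.and_eq_true,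
          h12, hall, beq_self_eq_true, true_and, id_eq]
        constructor
        · rintro ⟨h1, h2, h3, h4⟩; exact ⟨h1, h2, by omega, by omega⟩
        · rintro ⟨h1, h2, h3, h4⟩; exact ⟨h1, h2, by omega, by omega⟩
      · symm
        simp only [decide_eq_false_iff_not]
        rintro ⟨h1, h2, h3, h4⟩
        simp only [List.flatMap_cons, List.countP_append, List.all_cons, Bool.and_eq_true,
          id_eq] at h2 h3 h4
        exact hc ⟨h2.1, by omega, by omega⟩

-- ===== VERDICT (by name: the statement is the Claim_ definition above) =====
theorem validate_map_spec : Claim_equal_validate_map := by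
  intro map _
  unfold Spec_validate_map validate_map validate_map_alt
  by_cases hn : map.length ≠ 12
  · simp [hn]
  · rw [if_neg hn, if_neg hn, pvRowLoop_char map 0 0 (by omega) (by omega)]
    by_cases h1 : (map.all fun row => row.length == 12) = true
    · by_cases h2 : (map.all fun row => row.all fun cell => PySem.Set.contains pvALLOWED cell) = true
      · rw [if_neg (by simpa using h1), if_neg (by simpa using h2)]
        apply decide_eq_decide.mpr
        constructor
        · rintro ⟨_, _, h3, h4⟩; exact ⟨by omega, by omega⟩
        · rintro ⟨h3, h4⟩; exact ⟨h1, h2, by omega, by omega⟩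
      · rw [if_neg (by simpa using h1), if_pos (by simpa using h2)]
        simp only [decide_eq_false_iff_not]
        rintro ⟨-, hAll, -, -⟩
        exact h2 hAll
    · rw [if_pos (by simpa using h1)]
      simp only [decide_eq_false_iff_not]
      rintro ⟨hLen, -⟩
      exact h1 hLen
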